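-- pv_equiv track=rewrite | github.com/cideryman/document-password-tool | 문서일괄암호설정기_v1.41.py | _find_dialog_button
-- ===== SOURCE A (Python) =====
-- def _find_dialog_button(controls, preferred_texts, excluded_texts):
--     buttons = [
--         (hwnd, text)
--         for hwnd, cls, text in controls
--         if cls.lower() == "button" and not any(excluded in text for excluded in excluded_texts)
--     ]
--
--     for preferred in preferred_texts:
--         for hwnd, text in buttons:
--             if preferred.lower() in text.lower():
--                 return hwnd
--
--     return buttons[0][0] if buttons else None
-- ===== SOURCE B (Python) =====
-- def _find_dialog_button(controls, preferred_texts, excluded_texts):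
--     buttons = [
--         (hwnd, text)
--         for hwnd, cls, text in controls
--         if cls.lower() == "button"
--         and not any(excluded in text for excluded in excluded_texts)
--     ]
--     if not buttons:
--         return None
--     n = len(preferred_texts)
--
--     def priority(text):
--         tl = text.lower()
--         return next((i for i, p in enumerate(preferred_texts) if p.lower() in tl), n)
--
--     return min(buttons, key=lambda b: priority(b[1]))[0]
-- ===== Notes on version B (the rewrite author's own statement) =====
-- stated objective: alternative
-- what changed: A scans preferred_texts in an outer loop with an inner scan over the buttons and an early return; B makes a single stable-min pass over the buttons, keying each button by the index of the first preferred text matching it (len(preferred_texts) if none), which yields the same winner including the buttons[0] fallback.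
import Mathlib
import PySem

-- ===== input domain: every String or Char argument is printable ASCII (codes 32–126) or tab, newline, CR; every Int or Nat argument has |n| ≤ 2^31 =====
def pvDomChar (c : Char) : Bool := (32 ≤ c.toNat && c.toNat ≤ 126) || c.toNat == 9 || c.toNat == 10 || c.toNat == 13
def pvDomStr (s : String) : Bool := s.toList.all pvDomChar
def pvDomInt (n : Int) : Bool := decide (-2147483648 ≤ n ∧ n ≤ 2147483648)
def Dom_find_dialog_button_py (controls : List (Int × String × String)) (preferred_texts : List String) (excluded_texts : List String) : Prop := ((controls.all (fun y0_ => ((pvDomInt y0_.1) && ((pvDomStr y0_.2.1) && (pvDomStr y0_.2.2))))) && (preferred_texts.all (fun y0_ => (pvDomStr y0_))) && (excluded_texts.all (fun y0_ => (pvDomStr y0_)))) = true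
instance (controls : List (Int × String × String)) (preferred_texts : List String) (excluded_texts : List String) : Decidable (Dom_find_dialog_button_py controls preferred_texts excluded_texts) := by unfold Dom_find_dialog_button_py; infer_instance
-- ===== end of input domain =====

-- B replaces A's nested preferred×buttons scan with a single stable-min pass over the
-- buttons keyed by first-matching-preference index (same buttons filter; objective: alternative).

-- ===== PORT A =====
-- the `buttons` list comprehension
def pyButtons (controls : List (Int × String × String)) (excluded_texts : List String) : List (Int × String) :=
  controls.filterMap (fun c =>
    if PySem.Str.lower c.2.1 == "button"
        && !(excluded_texts.any (fun ex => PySem.Str.isIn ex c.2.2)) then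
      some (c.1, c.2.2)
    else none)

-- the nested `for preferred … for hwnd, text …` loops with early return
def pyFindLoop (buttons : List (Int × String)) : List String → Option Int
  | [] => none
  | p :: rest =>
    match buttons.find? (fun b => PySem.Str.isIn (PySem.Str.lower p) (PySem.Str.lower b.2)) with
    | some b => some b.1
    | none => pyFindLoop buttons rest

def find_dialog_button_py (controls : List (Int × String × String)) (preferred_texts : List String) (excluded_texts : List String) : Option Int :=
  let buttons := pyButtons controls excluded_texts
  match pyFindLoop buttons preferred_texts with
  | some h => some h
  | none => match buttons with
            | [] => none
            | b :: _ => some b.1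

-- ===== PORT B =====
-- `priority(text)`: index of the first matching preference, or len(preferred_texts)
def altPrio (preferred_texts : List String) (text : String) : Nat :=
  match preferred_texts.findIdx? (fun p => PySem.Str.isIn (PySem.Str.lower p) (PySem.Str.lower text)) with
  | some i => i
  | none => preferred_texts.length

-- `min(buttons, key=…)` : Python's min keeps the FIRST minimal element (strict-< fold)
def find_dialog_button_py_alt (controls : List (Int × String × String)) (preferred_texts : List String) (excluded_texts : List String) : Option Int :=
  match pyButtons controls excluded_texts with
  | [] => none
  | b0 :: rest =>
    some ((rest.foldl (fun acc b =>
      if altPrio preferred_texts b.2 < altPrio preferred_texts acc.2 then b else acc) b0).1)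

-- ===== PRECONDITION & SPEC =====
def Spec_find_dialog_button_py (controls : List (Int × String × String)) (preferred_texts : List String) (excluded_texts : List String) (out : Option Int) : Prop := out = find_dialog_button_py_alt controls preferred_texts excluded_texts
instance (controls : List (Int × String × String)) (preferred_texts : List String) (excluded_texts : List String) (out : Option Int) : Decidable (Spec_find_dialog_button_py controls preferred_texts excluded_texts out) := by unfold Spec_find_dialog_button_py; infer_instance

-- ===== CLAIM (what is proved, stated in full; the proofs are below) =====
def Claim_equal_find_dialog_button_py : Prop := ∀ (controls : List (Int × String × String)) (preferred_texts : List String) (excluded_texts : List String), Dom_find_dialog_button_py controls preferred_texts excluded_texts → Spec_find_dialog_button_py controls preferred_texts excluded_texts (find_dialog_button_py controls preferred_texts excluded_texts)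

-- ===== LEMMAS AND PROOFS =====

-- the first-minimum fold B uses, abstract over the key
def fmin {α : Type} (key : α → Nat) (a : α) (l : List α) : α :=
  l.foldl (fun acc b => if key b < key acc then b else acc) a

lemma alt_eq_fmin (controls : List (Int × String × String)) (preferred_texts : List String) (excluded_texts : List String) :
    find_dialog_button_py_alt controls preferred_texts excluded_texts =
      match pyButtons controls excluded_texts with
      | [] => none
      | b0 :: rest => some ((fmin (fun b => altPrio preferred_texts b.2) b0 rest).1) := by
  unfold find_dialog_button_py_alt fmin
  rfl

lemma fmin_of_key_zero {α : Type} (key : α → Nat) (a : α) (l : List α) (h : key a = 0) :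
    fmin key a l = a := by
  induction l with
  | nil => rfl
  | cons b t ih =>
    unfold fmin
    simp only [List.foldl_cons]
    have hnb : ¬ key b < key a := by omega
    simp only [if_neg hnb]
    exact ih

lemma fmin_find_zero {α : Type} (m : α → Bool) (key : α → Nat)
    (hk : ∀ x, key x = 0 ↔ m x = true) (l : List α) :
    ∀ (a b : α), List.find? m (a :: l) = some b → fmin key a l = b := by
  induction l with
  | nil =>
    intro a b h
    simp only [List.find?_cons, List.find?_nil] at h
    cases hma : m a with
    | true => simp [hma] at h; simpa [fmin] using h
    | false => simp [hma] at h
  | cons c t ih =>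
    intro a b h
    unfold fmin
    simp only [List.foldl_cons]
    cases hma : m a with
    | true =>
      rw [List.find?_cons_of_pos hma] at h
      injection h with h; subst h
      have ha0 : key a = 0 := (hk a).mpr hma
      have hnc : ¬ key c < key a := by omega
      simp only [if_neg hnc]
      exact fmin_of_key_zero key a t ha0
    | false =>
      rw [List.find?_cons_of_neg (by simp [hma])] at h
      have hanz : key a ≠ 0 := fun h0 => by simp [(hk a).mp h0] at hma
      cases hmc : m c with
      | true =>
        rw [List.find?_cons_of_pos hmc] at h
        injection h with h; subst h
        have hc0 : key c = 0 := (hk c).mpr hmc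
        have hlt : key c < key a := by omega
        simp only [if_pos hlt]
        exact fmin_of_key_zero key c t hc0
      | false =>
        rw [List.find?_cons_of_neg (by simp [hmc])] at h
        by_cases hlt : key c < key a
        · simp only [if_pos hlt]
          exact ih c b (by rw [List.find?_cons_of_neg (by simp [hmc])]; exact h)
        · simp only [if_neg hlt]
          exact ih a b (by rw [List.find?_cons_of_neg (by simp [hma])]; exact h)

lemma fmin_congr_succ {α : Type} (key1 key2 : α → Nat) (l : List α) :
    ∀ (a : α), (∀ x ∈ a :: l, key1 x = key2 x + 1) → fmin key1 a l = fmin key2 a l := by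
  induction l with
  | nil => intro a _; rfl
  | cons b t ih =>
    intro a h
    unfold fmin
    simp only [List.foldl_cons]
    have hb : key1 b = key2 b + 1 := h b (by simp)
    have ha : key1 a = key2 a + 1 := h a (by simp)
    by_cases hlt : key2 b < key2 a
    · rw [if_pos hlt, if_pos (show key1 b < key1 a by omega)]
      exact ih b (fun x hx => h x (by simp at hx ⊢; tauto))
    · rw [if_neg hlt, if_neg (show ¬ key1 b < key1 a by omega)]
      exact ih a (fun x hx => h x (by simp at hx ⊢; tauto))

lemma altPrio_nil (text : String) : altPrio [] text = 0 := rfl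

lemma altPrio_cons (p : String) (rest : List String) (text : String) :
    altPrio (p :: rest) text =
      if PySem.Str.isIn (PySem.Str.lower p) (PySem.Str.lower text) then 0
      else altPrio rest text + 1 := by
  unfold altPrio
  simp only [List.findIdx?_cons]
  by_cases h : PySem.Chars.isIn (PySem.Chars.lower p.toList) (PySem.Chars.lower text.toList) = true
  · simp [h]
  · simp only [Bool.not_eq_true] at h
    cases hf : List.findIdx? (fun q => PySem.Str.isIn (PySem.Str.lower q) (PySem.Str.lower text)) rest with
    | none => simp at hf; simp [h]
    | some i => simp at hf; simp [h]

lemma pyFindLoop_nil (preferred_texts : List String) : pyFindLoop [] preferred_texts = none := by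
  induction preferred_texts with
  | nil => rfl
  | cons p rest ih => simp only [pyFindLoop, List.find?_nil]; exact ih

lemma main_lemma (preferred_texts : List String) (b0 : Int × String) (r : List (Int × String)) :
    (match pyFindLoop (b0 :: r) preferred_texts with
     | some h => some h
     | none => some b0.1) =
      some ((fmin (fun b => altPrio preferred_texts b.2) b0 r).1) := by
  induction preferred_texts with
  | nil =>
    simp only [pyFindLoop]
    rw [fmin_of_key_zero (fun b => altPrio [] b.2) b0 r (altPrio_nil b0.2)]
  | cons p rest ih =>
    simp only [pyFindLoop]
    have hk : ∀ x : Int × String,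
        (fun b : Int × String => altPrio (p :: rest) b.2) x = 0 ↔
          (fun b : Int × String => PySem.Str.isIn (PySem.Str.lower p) (PySem.Str.lower b.2)) x = true := by
      intro x
      simp only [altPrio_cons]
      simp
    cases hf : (b0 :: r).find? (fun b => PySem.Str.isIn (PySem.Str.lower p) (PySem.Str.lower b.2)) with
    | some b =>
      rw [fmin_find_zero _ _ hk r b0 b hf]
    | none =>
      have hnone : ∀ x ∈ b0 :: r,
          PySem.Str.isIn (PySem.Str.lower p) (PySem.Str.lower x.2) = false := by
        intro x hx
        have hfx := List.find?_eq_none.mp hf x hx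
        simpa using hfx
      have hcongr : fmin (fun b : Int × String => altPrio (p :: rest) b.2) b0 r
          = fmin (fun b : Int × String => altPrio rest b.2) b0 r := by
        apply fmin_congr_succ
        intro x hx
        simp only [altPrio_cons, hnone x hx]
        simp
      rw [hcongr]
      exact ih

lemma bridge (bs : List (Int × String)) (preferred_texts : List String) :
    (match pyFindLoop bs preferred_texts with
     | some h => some h
     | none => match bs with
               | [] => (none : Option Int)
               | b :: _ => some b.1) =
      match bs with
      | [] => (none : Option Int)
      | b0 :: rest => some ((fmin (fun b => altPrio preferred_texts b.2) b0 rest).1) := by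
  cases bs with
  | nil => rw [pyFindLoop_nil]
  | cons b0 r => exact main_lemma preferred_texts b0 r

-- ===== VERDICT (by name: the statement is the Claim_ definition above) =====
theorem find_dialog_button_py_spec : Claim_equal_find_dialog_button_py := by
  intro controls preferred_texts excluded_texts _
  unfold Spec_find_dialog_button_py
  rw [alt_eq_fmin]
  exact bridge (pyButtons controls excluded_texts) preferred_texts
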